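-- pv_equiv track=rewrite | github.com/keepinmind2054/evoclaw | skills_engine/path_remap.py | resolve_path_remap
-- ===== SOURCE A (Python) =====
-- def resolve_path_remap(path: str, remap: dict[str, str]) -> str:
--     """
--     Resolve a path through the remap table, following chains.
--     Returns the final resolved path.
--     """
--     visited = set()
--     current = path
--     while current in remap:
--         if current in visited:
--             break  # Cycle detection
--         visited.add(current)
--         current = remap[current]
--     return current
-- ===== SOURCE B (Python) =====
-- def resolve_path_remap(path: str, remap: dict[str, str]) -> str:
--     """
--     Resolve a path through the remap table, following chains.
--     Returns the final resolved path.
--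
--     Floyd's tortoise-and-hare: no visited set. The hare moves two hops per
--     round (each hop guarded, returning the first node that leaves the table);
--     if it meets the tortoise a cycle exists, and the reset-to-start second
--     phase advances both one hop per round until they coincide at the cycle
--     entry, which is exactly the first node the chain revisits.
--     """
--     slow = path
--     fast = path
--     while True:
--         if fast not in remap:
--             return fast
--         fast = remap[fast]
--         if fast not in remap:
--             return fast
--         fast = remap[fast]
--         slow = remap[slow]
--         if slow == fast:
--             break
--     # cycle: find its entry
--     slow = path
--     while slow != fast:
--         slow = remap[slow]
--         fast = remap[fast]
--     return slow
-- ===== Notes on version B (the rewrite author's own statement) =====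
-- stated objective: alternative
-- what changed: B replaces A's visited-set walk by Floyd's tortoise-and-hare cycle detection: a two-speed race (each hare hop guarded, returning the first node outside the table) followed by the reset-to-start phase that advances both pointers one hop until they coincide at the cycle entry, which is exactly A's first-revisited node; B uses O(1) extra space instead of A's O(n) set.
import Mathlib
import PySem

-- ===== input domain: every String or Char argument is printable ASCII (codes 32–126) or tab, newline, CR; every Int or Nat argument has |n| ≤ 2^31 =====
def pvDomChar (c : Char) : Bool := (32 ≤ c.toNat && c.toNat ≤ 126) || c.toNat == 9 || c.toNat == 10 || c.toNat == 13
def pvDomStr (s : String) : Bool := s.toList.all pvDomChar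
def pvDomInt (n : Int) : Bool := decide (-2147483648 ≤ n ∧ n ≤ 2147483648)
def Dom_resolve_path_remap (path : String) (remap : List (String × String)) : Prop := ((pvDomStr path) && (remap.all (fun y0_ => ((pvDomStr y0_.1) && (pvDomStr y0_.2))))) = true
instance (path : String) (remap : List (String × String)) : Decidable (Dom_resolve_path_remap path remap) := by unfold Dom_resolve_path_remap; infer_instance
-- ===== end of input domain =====

-- B replaces A's visited-set chain walk by Floyd's tortoise-and-hare cycle detection
-- (two-speed race, then reset-to-start to find the cycle entry); O(1) extra space. No argument is mutated.

-- ===== PORT A =====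
-- Loop of A: `while current in remap: if current in visited: break; visited.add(current); current = remap[current]`.
-- `current in remap` + `remap[current]` are rendered as one match on `get?` (`contains d k = (d.get? k).isSome`).
def resolve_path_remap_loop (remap : PySem.Dict String String) (visited : PySem.Set String) (current : String) : String :=
  match h : remap.get? current with
  | none => current
  | some nxt =>
      if hv : PySem.Set.contains visited current then current
      else resolve_path_remap_loop remap (PySem.Set.add visited current) nxt
termination_by (remap.keys.toFinset \ visited.toFinset).card
decreasing_by
  have hmem : current ∈ remap.keys := by
    by_contra hc
    rw [← PySem.Dict.get?_eq_none_iff_not_mem_keys] at hc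
    rw [h] at hc
    exact Option.some_ne_none _ hc
  have hnv : current ∉ visited := fun hm => hv ((PySem.Set.contains_iff visited current).mpr hm)
  have hadd : PySem.Set.add visited current = visited ++ [current] := by
    simp only [PySem.Set.add, if_neg hv]
  rw [hadd]
  apply Finset.card_lt_card
  rw [Finset.ssubset_iff_of_subset (Finset.sdiff_subset_sdiff (Finset.Subset.refl _) (by simp [List.toFinset_append]))]
  exact ⟨current, by simp [List.mem_toFinset, hmem, hnv], by simp⟩

def resolve_path_remap (path : String) (remap : List (String × String)) : String :=
  resolve_path_remap_loop (PySem.Dict.mk remap) PySem.Set.empty path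

-- ===== PORT B =====
-- Phase 2 of B: `slow = path; while slow != fast: slow = remap[slow]; fast = remap[fast]; return slow`.
-- The fuel argument only makes the `while` total (remap.size + 1 always suffices, proved below);
-- `remap[x]` is rendered total as `(get? x).getD x` — the key is always present when this runs (proved below).
def floyd_cycle_entry (d : PySem.Dict String String) : Nat → String → String → String
  | 0, slow, _ => slow
  | fuel+1, slow, fast =>
      if slow = fast then slow
      else floyd_cycle_entry d fuel ((d.get? slow).getD slow) ((d.get? fast).getD fast)

-- Phase 1 of B: `while True: if fast not in remap: return fast; fast = remap[fast]; (again); slow = remap[slow]; if slow == fast: break`.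
-- Fuel only makes the `while True` total (remap.size + 1 always suffices, proved below).
def floyd_race (d : PySem.Dict String String) (path : String) : Nat → String → String → String
  | 0, slow, _ => slow
  | fuel+1, slow, fast =>
      match d.get? fast with
      | none => fast
      | some f1 =>
        match d.get? f1 with
        | none => f1
        | some f2 =>
          let slow' := (d.get? slow).getD slow
          if slow' = f2 then floyd_cycle_entry d (d.size + 1) path f2
          else floyd_race d path fuel slow' f2

def resolve_path_remap_alt (path : String) (remap : List (String × String)) : String :=
  floyd_race (PySem.Dict.mk remap) path ((PySem.Dict.mk remap).size + 1) path path

-- ===== PRECONDITION & SPEC =====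
def Spec_resolve_path_remap (path : String) (remap : List (String × String)) (out : String) : Prop := out = resolve_path_remap_alt path remap
instance (path : String) (remap : List (String × String)) (out : String) : Decidable (Spec_resolve_path_remap path remap out) := by unfold Spec_resolve_path_remap; infer_instance

-- ===== CLAIM (what is proved, stated in full; the proofs are below) =====
def Claim_equal_resolve_path_remap : Prop := ∀ (path : String) (remap : List (String × String)), Dom_resolve_path_remap path remap → Spec_resolve_path_remap path remap (resolve_path_remap path remap)

-- ===== LEMMAS AND PROOFS =====

-- One step of the chain, made total (identity outside the table), and the trajectory it generates.
def fstep (d : PySem.Dict String String) (x : String) : String := (d.get? x).getD x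
def traj (d : PySem.Dict String String) (p : String) (k : Nat) : String := (fstep d)^[k] p

theorem traj_zero (d : PySem.Dict String String) (p : String) : traj d p 0 = p := rfl

theorem traj_succ (d : PySem.Dict String String) (p : String) (k : Nat) :
    traj d p (k+1) = fstep d (traj d p k) := Function.iterate_succ_apply' _ _ _

theorem traj_succ_of_get? (d : PySem.Dict String String) (p : String) (k : Nat) {v : String}
    (h : d.get? (traj d p k) = some v) : traj d p (k+1) = v := by
  rw [traj_succ, fstep, h]; rfl

-- Periodicity generated by one repetition t a = t b (a < b), from index a on.
theorem traj_per (d : PySem.Dict String String) (p : String) {a b : Nat}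
    (hab : a < b) (heq : traj d p a = traj d p b) :
    ∀ k, a ≤ k → traj d p (k + (b - a)) = traj d p k := by
  intro k hk
  induction k, hk using Nat.le_induction with
  | base =>
    have : a + (b - a) = b := by omega
    rw [this, ← heq]
  | succ k hk ih =>
    have : k + 1 + (b - a) = (k + (b - a)) + 1 := by omega
    rw [this, traj_succ, ih, traj_succ]

theorem traj_per_mul (d : PySem.Dict String String) (p : String) {a b : Nat}
    (hab : a < b) (heq : traj d p a = traj d p b) :
    ∀ c k, a ≤ k → traj d p (k + c * (b - a)) = traj d p k := by
  intro c
  induction c with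
  | zero => intro k hk; simp
  | succ c ih =>
    intro k hk
    have h1 : k + (c + 1) * (b - a) = (k + c * (b - a)) + (b - a) := by ring
    rw [h1, traj_per d p hab heq _ (by omega), ih k hk]

-- canonical representative in [a, b) of any index ≥ a
theorem traj_canon (d : PySem.Dict String String) (p : String) {a b : Nat}
    (hab : a < b) (heq : traj d p a = traj d p b) :
    ∀ k, a ≤ k → traj d p k = traj d p (a + (k - a) % (b - a)) := by
  intro k hk
  have hba : 0 < b - a := by omega
  have hdm := Nat.div_add_mod (k - a) (b - a)
  have hcm : (k - a) / (b - a) * (b - a) = (b - a) * ((k - a) / (b - a)) := Nat.mul_comm _ _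
  have h1 : k = a + (k - a) % (b - a) + (k - a) / (b - a) * (b - a) := by omega
  conv_lhs => rw [h1]
  exact traj_per_mul d p hab heq _ _ (by omega)

-- (get? x).getD x IS fstep, so the tortoise/hare update always advances the trajectory.
theorem fstep_traj (d : PySem.Dict String String) (p : String) (k : Nat) :
    (d.get? (traj d p k)).getD (traj d p k) = traj d p (k+1) := (traj_succ d p k).symm

-- a prefix of the trajectory that is pairwise distinct and inside the table is no longer than the table
theorem traj_card_le (d : PySem.Dict String String) (p : String) {n : Nat}
    (hinj : ∀ a b, a < n → b < n → traj d p a = traj d p b → a = b)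
    (hin : ∀ k, k < n → (d.get? (traj d p k)).isSome) : n ≤ d.size := by
  have h1 : (Finset.range n).card ≤ d.keys.toFinset.card := by
    apply Finset.card_le_card_of_injOn (traj d p)
    · intro k hk
      simp only [Finset.mem_coe, Finset.mem_range] at hk
      simp only [Finset.mem_coe, List.mem_toFinset]
      by_contra hmem
      rw [← PySem.Dict.get?_eq_none_iff_not_mem_keys] at hmem
      have := hin k hk
      rw [hmem] at this
      simp at this
    · intro a ha b hb hab
      rw [Finset.mem_coe, Finset.mem_range] at ha hb
      exact hinj a b ha hb hab
  have h2 : d.keys.toFinset.card ≤ d.keys.length := List.toFinset_card_le _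
  have h3 : d.keys.length = d.size := by
    simp [PySem.Dict.keys, PySem.Dict.size]
  simp only [Finset.card_range] at h1
  omega

-- ===== the TERMINATING case: some step leaves the table; e is the first such index =====

theorem injT (d : PySem.Dict String String) (p : String) {e : Nat}
    (he : d.get? (traj d p e) = none)
    (hmin : ∀ k, k < e → (d.get? (traj d p k)).isSome) :
    ∀ a b, a ≤ e → b ≤ e → traj d p a = traj d p b → a = b := by
  have key : ∀ a b, a < b → b ≤ e → traj d p a = traj d p b → False := by
    intro a b hab hbe heq
    have h0 : 0 < b - a := by omega
    have hcanon := traj_canon d p hab heq e (by omega)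
    have hlt : a + (e - a) % (b - a) < e := by
      have := Nat.mod_lt (e - a) h0
      omega
    have hsome := hmin _ hlt
    rw [← hcanon, he] at hsome
    simp at hsome
  intro a b ha hb heq
  rcases Nat.lt_trichotomy a b with h | h | h
  · exact absurd heq (fun hq => key a b h hb hq)
  · exact h
  · exact absurd heq.symm (fun hq => key b a h ha hq)

-- A's loop in the terminating case returns the first node outside the table.
theorem AloopT (d : PySem.Dict String String) (p : String) {e : Nat}
    (he : d.get? (traj d p e) = none)
    (hmin : ∀ k, k < e → (d.get? (traj d p k)).isSome) :
    ∀ visited current,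
      (∃ k, k ≤ e ∧ current = traj d p k ∧ (∀ x, x ∈ visited ↔ ∃ j, j < k ∧ traj d p j = x)) →
      resolve_path_remap_loop d visited current = traj d p e := by
  intro visited current
  fun_induction resolve_path_remap_loop d visited current with
  | case1 visited current hnone =>
    rintro ⟨k, hk, rfl, hvis⟩
    have hke : k = e := by
      by_contra hne
      have hlt : k < e := by omega
      have := hmin k hlt
      rw [hnone] at this
      simp at this
    rw [hke]
  | case2 visited current nxt hsome hv =>
    rintro ⟨k, hk, rfl, hvis⟩
    have hmem : traj d p k ∈ visited := (PySem.Set.contains_iff _ _).mp hv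
    obtain ⟨j, hj, hjeq⟩ := (hvis _).mp hmem
    have := injT d p he hmin j k (by omega) hk hjeq
    omega
  | case3 visited current nxt hsome hv ih =>
    rintro ⟨k, hk, rfl, hvis⟩
    have hklt : k < e := by
      rcases Nat.lt_or_ge k e with h | h
      · exact h
      · have hke : k = e := by omega
        rw [hke, he] at hsome
        exact absurd hsome (by simp)
    apply ih
    refine ⟨k + 1, by omega, (traj_succ_of_get? d p k hsome).symm, ?_⟩
    intro x
    rw [PySem.Set.mem_add, hvis]
    constructor
    · rintro (⟨j, hj, hjeq⟩ | hx)
      · exact ⟨j, by omega, hjeq⟩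
      · exact ⟨k, by omega, hx.symm⟩
    · rintro ⟨j, hj, hjeq⟩
      rcases Nat.lt_or_ge j k with h | h
      · exact Or.inl ⟨j, h, hjeq⟩
      · have : j = k := by omega
        subst this
        exact Or.inr hjeq.symm

-- B's race in the terminating case: the hare checks every index in order and exits first.
theorem floyd1T (d : PySem.Dict String String) (p : String) {e : Nat}
    (he : d.get? (traj d p e) = none)
    (hmin : ∀ k, k < e → (d.get? (traj d p k)).isSome) :
    ∀ fuel i0, 2 * i0 ≤ e → e - 2 * i0 < fuel →
      floyd_race d p fuel (traj d p i0) (traj d p (2 * i0)) = traj d p e := by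
  have hstep : ∀ k, k < e → d.get? (traj d p k) = some (traj d p (k+1)) := by
    intro k hk
    obtain ⟨v, hv⟩ := Option.isSome_iff_exists.mp (hmin k hk)
    rw [hv, traj_succ_of_get? d p k hv]
  intro fuel
  induction fuel with
  | zero => intro i0 h1 h2; omega
  | succ fuel ih =>
    intro i0 h1 h2
    by_cases hA : 2 * i0 = e
    · simp only [floyd_race, hA, he]
    · have hAlt : 2 * i0 < e := by omega
      by_cases hB : 2 * i0 + 1 = e
      · simp only [floyd_race, hstep _ hAlt, hB, he]
      · have hBlt : 2 * i0 + 1 < e := by omega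
        simp only [floyd_race, hstep _ hAlt, hstep _ hBlt, fstep_traj]
        have hne : ¬ (traj d p (i0 + 1) = traj d p (2 * i0 + 1 + 1)) := by
          intro hq
          have := injT d p he hmin (i0 + 1) (2 * i0 + 1 + 1) (by omega) (by omega) hq
          omega
        rw [if_neg hne]
        have h2i : 2 * i0 + 1 + 1 = 2 * (i0 + 1) := by omega
        rw [h2i]
        exact ih (i0 + 1) (by omega) (by omega)

-- ===== the CYCLIC case: the chain never leaves the table; m is the first repeat index, μ its earlier partner =====

theorem injC (d : PySem.Dict String String) (p : String) {m : Nat}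
    (hmin : ∀ k, k < m → ¬ ∃ j, j < k ∧ traj d p j = traj d p k) :
    ∀ a b, a < m → b < m → traj d p a = traj d p b → a = b := by
  intro a b ha hb heq
  rcases Nat.lt_trichotomy a b with h | h | h
  · exact absurd ⟨a, h, heq⟩ (hmin b hb)
  · exact h
  · exact absurd ⟨b, h, heq.symm⟩ (hmin a ha)

-- a pre-cycle node never equals an in-cycle node
theorem crossC (d : PySem.Dict String String) (p : String) {m μ : Nat}
    (hμm : μ < m) (hμeq : traj d p μ = traj d p m)
    (hmin : ∀ k, k < m → ¬ ∃ j, j < k ∧ traj d p j = traj d p k) :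
    ∀ c k, c < μ → μ ≤ k → traj d p c ≠ traj d p k := by
  intro c k hc hk heq
  have hcanon := traj_canon d p hμm hμeq k hk
  have hρ : μ + (k - μ) % (m - μ) < m := by
    have := Nat.mod_lt (k - μ) (y := m - μ) (by omega)
    omega
  exact hmin _ hρ ⟨c, by omega, by rw [heq, hcanon]⟩

-- a meeting of the two pointers happens exactly at the multiples of the период ≥ μ
theorem meetC_fwd (d : PySem.Dict String String) (p : String) {m μ : Nat}
    (hμm : μ < m) (hμeq : traj d p μ = traj d p m)
    (hmin : ∀ k, k < m → ¬ ∃ j, j < k ∧ traj d p j = traj d p k) :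
    ∀ i, 1 ≤ i → traj d p i = traj d p (2 * i) → μ ≤ i ∧ (m - μ) ∣ i := by
  intro i hi heq
  have hμi : μ ≤ i := by
    by_contra hlt
    have hilt : i < μ := by omega
    have hm2i : m ≤ 2 * i := by
      by_contra h2
      exact hmin (2 * i) (by omega) ⟨i, by omega, heq⟩
    exact crossC d p hμm hμeq hmin i (2 * i) hilt (by omega) heq
  refine ⟨hμi, ?_⟩
  have hc1 := traj_canon d p hμm hμeq i hμi
  have hc2 := traj_canon d p hμm hμeq (2 * i) (by omega)
  have hρ1 : μ + (i - μ) % (m - μ) < m := by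
    have := Nat.mod_lt (i - μ) (y := m - μ) (by omega); omega
  have hρ2 : μ + (2 * i - μ) % (m - μ) < m := by
    have := Nat.mod_lt (2 * i - μ) (y := m - μ) (by omega); omega
  have hinj := injC d p hmin _ _ hρ1 hρ2 (by rw [← hc1, ← hc2, heq])
  have hmodeq : Nat.ModEq (m - μ) (i - μ) (2 * i - μ) := by
    unfold Nat.ModEq
    omega
  have := (Nat.modEq_iff_dvd' (by omega)).mp hmodeq
  have harith : 2 * i - μ - (i - μ) = i := by omega
  rwa [harith] at this

theorem meetC_back (d : PySem.Dict String String) (p : String) {m μ : Nat}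
    (hμm : μ < m) (hμeq : traj d p μ = traj d p m) :
    ∀ i, μ ≤ i → (m - μ) ∣ i → traj d p (2 * i) = traj d p i := by
  rintro i hμi ⟨q, hq⟩
  have h2 : 2 * i = i + q * (m - μ) := by
    rw [hq]; ring
  rw [h2]
  exact traj_per_mul d p hμm hμeq q i hμi

-- Phase 2: resetting the tortoise and advancing both one hop per round meets first at the cycle entry μ.
theorem floyd2C (d : PySem.Dict String String) (p : String) {m μ i : Nat}
    (hμm : μ < m) (hμeq : traj d p μ = traj d p m)
    (hmin : ∀ k, k < m → ¬ ∃ j, j < k ∧ traj d p j = traj d p k)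
    (hμi : μ ≤ i) (hdvd : (m - μ) ∣ i) :
    ∀ fuel c, c ≤ μ → μ - c < fuel →
      floyd_cycle_entry d fuel (traj d p c) (traj d p (2 * i + c)) = traj d p μ := by
  intro fuel
  induction fuel with
  | zero => intro c h1 h2; omega
  | succ fuel ih =>
    intro c h1 h2
    rw [floyd_cycle_entry]
    by_cases hc : c = μ
    · have heq2 : traj d p c = traj d p (2 * i + c) := by
        subst hc
        obtain ⟨q, hq⟩ := hdvd
        have h2i : 2 * i + c = c + 2 * q * (m - c) := by rw [hq]; ring
        rw [h2i, traj_per_mul d p hμm hμeq (2 * q) c (le_refl _)]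
      rw [if_pos heq2, hc]
    · have hclt : c < μ := by omega
      have hne : ¬ (traj d p c = traj d p (2 * i + c)) :=
        crossC d p hμm hμeq hmin c (2 * i + c) hclt (by omega)
      rw [if_neg hne]
      simp only [fstep_traj]
      have harr : 2 * i + c + 1 = 2 * i + (c + 1) := by omega
      rw [harr]
      exact ih (c + 1) (by omega) (by omega)

-- A's loop in the cyclic case returns the first revisited node, traj m.
theorem AloopC (d : PySem.Dict String String) (p : String) {m μ : Nat}
    (hC : ∀ k, (d.get? (traj d p k)).isSome)
    (hμm : μ < m) (hμeq : traj d p μ = traj d p m)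
    (hmin : ∀ k, k < m → ¬ ∃ j, j < k ∧ traj d p j = traj d p k) :
    ∀ visited current,
      (∃ k, k ≤ m ∧ current = traj d p k ∧ (∀ x, x ∈ visited ↔ ∃ j, j < k ∧ traj d p j = x)) →
      resolve_path_remap_loop d visited current = traj d p m := by
  intro visited current
  fun_induction resolve_path_remap_loop d visited current with
  | case1 visited current hnone =>
    rintro ⟨k, hk, rfl, hvis⟩
    have := hC k
    rw [hnone] at this
    simp at this
  | case2 visited current nxt hsome hv =>
    rintro ⟨k, hk, rfl, hvis⟩
    have hmem : traj d p k ∈ visited := (PySem.Set.contains_iff _ _).mp hv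
    obtain ⟨j, hj, hjeq⟩ := (hvis _).mp hmem
    have hkm : k = m := by
      by_contra hne
      exact hmin k (by omega) ⟨j, hj, hjeq⟩
    rw [hkm]
  | case3 visited current nxt hsome hv ih =>
    rintro ⟨k, hk, rfl, hvis⟩
    have hklt : k < m := by
      by_contra hge
      have hkm : k = m := by omega
      subst hkm
      exact hv ((PySem.Set.contains_iff _ _).mpr ((hvis _).mpr ⟨μ, hμm, hμeq⟩))
    apply ih
    refine ⟨k + 1, by omega, (traj_succ_of_get? d p k hsome).symm, ?_⟩
    intro x
    rw [PySem.Set.mem_add, hvis]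
    constructor
    · rintro (⟨j, hj, hjeq⟩ | hx)
      · exact ⟨j, by omega, hjeq⟩
      · exact ⟨k, by omega, hx.symm⟩
    · rintro ⟨j, hj, hjeq⟩
      rcases Nat.lt_or_ge j k with h | h
      · exact Or.inl ⟨j, h, hjeq⟩
      · have : j = k := by omega
        subst this
        exact Or.inr hjeq.symm

-- Phase 1 in the cyclic case: the race reaches the first meeting index i*, then phase 2 returns traj μ.
theorem floyd1C (d : PySem.Dict String String) (p : String) {m μ istar : Nat}
    (hC : ∀ k, (d.get? (traj d p k)).isSome)
    (hμm : μ < m) (hμeq : traj d p μ = traj d p m)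
    (hmin : ∀ k, k < m → ¬ ∃ j, j < k ∧ traj d p j = traj d p k)
    (hi1 : 1 ≤ istar) (himeet : traj d p istar = traj d p (2 * istar))
    (himin : ∀ i', i' < istar → ¬ (1 ≤ i' ∧ traj d p i' = traj d p (2 * i')))
    (hμs : μ ≤ d.size) :
    ∀ fuel i0, i0 < istar → istar - i0 ≤ fuel →
      floyd_race d p fuel (traj d p i0) (traj d p (2 * i0)) = traj d p μ := by
  have hstep : ∀ k, d.get? (traj d p k) = some (traj d p (k+1)) := by
    intro k
    obtain ⟨v, hv⟩ := Option.isSome_iff_exists.mp (hC k)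
    rw [hv, traj_succ_of_get? d p k hv]
  obtain ⟨hμi, hdvd⟩ := meetC_fwd d p hμm hμeq hmin istar hi1 himeet
  intro fuel
  induction fuel with
  | zero => intro i0 h1 h2; omega
  | succ fuel ih =>
    intro i0 h1 h2
    simp only [floyd_race, hstep (2 * i0), hstep (2 * i0 + 1), fstep_traj]
    by_cases hmeet : traj d p (i0 + 1) = traj d p (2 * i0 + 1 + 1)
    · rw [if_pos hmeet]
      have h2i : 2 * i0 + 1 + 1 = 2 * (i0 + 1) := by omega
      have histar : istar = i0 + 1 := by
        by_contra hne
        have hlt : i0 + 1 < istar := by omega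
        exact himin (i0 + 1) hlt ⟨by omega, by rw [hmeet, h2i]⟩
      have := floyd2C d p hμm hμeq hmin hμi hdvd (d.size + 1) 0 (by omega) (by omega)
      rw [traj_zero] at this
      rw [show (2 * i0 + 1 + 1) = 2 * istar + 0 by omega]
      exact this
    · rw [if_neg hmeet]
      have h2i : 2 * i0 + 1 + 1 = 2 * (i0 + 1) := by omega
      rw [h2i]
      have hlt : i0 + 1 < istar := by
        by_contra hge
        have : istar = i0 + 1 := by omega
        subst this
        rw [← h2i] at himeet
        exact hmeet himeet
      exact ih (i0 + 1) hlt (by omega)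

-- the smallest multiple of L past a: a ≤ L*(a/L + 1) ≤ a + L
theorem mul_div_succ_bounds (L a : Nat) (hL : 0 < L) :
    a ≤ L * (a / L + 1) ∧ L * (a / L + 1) ≤ a + L := by
  have h1 := Nat.div_add_mod a L
  have h2 := Nat.mod_lt a hL
  have h3 : L * (a / L + 1) = L * (a / L) + L := Nat.mul_succ L (a / L)
  omega

-- pigeonhole: if the chain never leaves the table, it repeats
theorem traj_exists_repeat (d : PySem.Dict String String) (p : String)
    (hC : ∀ k, (d.get? (traj d p k)).isSome) :
    ∃ m, ∃ j, j < m ∧ traj d p j = traj d p m := by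
  have hmaps : ∀ k ∈ Finset.range (d.size + 1), traj d p k ∈ d.keys.toFinset := by
    intro k _
    rw [List.mem_toFinset]
    by_contra hmem
    rw [← PySem.Dict.get?_eq_none_iff_not_mem_keys] at hmem
    have := hC k
    rw [hmem] at this
    simp at this
  have hcard : d.keys.toFinset.card < (Finset.range (d.size + 1)).card := by
    have h2 : d.keys.toFinset.card ≤ d.keys.length := List.toFinset_card_le _
    have h3 : d.keys.length = d.size := by simp [PySem.Dict.keys, PySem.Dict.size]
    simp only [Finset.card_range]
    omega
  obtain ⟨a, _, b, _, hab, heq⟩ :=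
    Finset.exists_ne_map_eq_of_card_lt_of_maps_to hcard hmaps
  rcases Nat.lt_trichotomy a b with h | h | h
  · exact ⟨b, a, h, heq⟩
  · exact absurd h hab
  · exact ⟨a, b, h, heq.symm⟩

-- ===== VERDICT (by name: the statement is the Claim_ definition above) =====
theorem resolve_path_remap_spec : Claim_equal_resolve_path_remap := by
  intro path remap _
  unfold Spec_resolve_path_remap resolve_path_remap resolve_path_remap_alt
  set d := PySem.Dict.mk remap with hd
  set p := path with hp
  have hvis0 : ∀ x, x ∈ PySem.Set.empty ↔ ∃ j, j < 0 ∧ traj d p j = x := by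
    intro x
    simp [PySem.Set.empty]
  by_cases hterm : ∃ k, d.get? (traj d p k) = none
  · -- terminating chain
    have hfind := Nat.find_spec hterm
    set e := Nat.find hterm with heq_e
    have hmin : ∀ k, k < e → (d.get? (traj d p k)).isSome := by
      intro k hk
      have := Nat.find_min hterm hk
      exact Option.ne_none_iff_isSome.mp this
    have hebound : e ≤ d.size :=
      traj_card_le d p (fun a b ha hb => injT d p hfind hmin a b (by omega) (by omega)) hmin
    have hA := AloopT d p hfind hmin PySem.Set.empty p ⟨0, by omega, rfl, hvis0⟩
    have hB := floyd1T d p hfind hmin (d.size + 1) 0 (by omega) (by omega)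
    rw [show (2 * 0 : Nat) = 0 from rfl, traj_zero] at hB
    rw [hA, hB]
  · -- cyclic chain
    have hC : ∀ k, (d.get? (traj d p k)).isSome := by
      intro k
      rw [← Option.ne_none_iff_isSome]
      exact fun h => hterm ⟨k, h⟩
    have hrep := traj_exists_repeat d p hC
    have hfind := Nat.find_spec hrep
    set m := Nat.find hrep with heq_m
    have hmin : ∀ k, k < m → ¬ ∃ j, j < k ∧ traj d p j = traj d p k := by
      intro k hk
      exact Nat.find_min hrep hk
    obtain ⟨μ, hμm, hμeq⟩ := hfind
    have hmbound : m ≤ d.size :=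
      traj_card_le d p (injC d p hmin) (fun k _ => hC k)
    -- a meeting index exists: the smallest multiple of the period ≥ μ works
    have hlam : 0 < m - μ := by omega
    obtain ⟨P, hP⟩ : ∃ P, P = (m - μ) * (μ / (m - μ) + 1) := ⟨_, rfl⟩
    have hb1 : μ ≤ P := by rw [hP]; exact (mul_div_succ_bounds _ _ hlam).1
    have hb2 : P ≤ μ + (m - μ) := by rw [hP]; exact (mul_div_succ_bounds _ _ hlam).2
    have hPpos : 0 < P := by rw [hP]; exact Nat.mul_pos hlam (Nat.succ_pos _)
    have hPdvd : (m - μ) ∣ P := ⟨μ / (m - μ) + 1, hP⟩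
    have hmex : ∃ i, 1 ≤ i ∧ traj d p i = traj d p (2 * i) :=
      ⟨P, hPpos, (meetC_back d p hμm hμeq P hb1 hPdvd).symm⟩
    have hmeet_spec := Nat.find_spec hmex
    set istar := Nat.find hmex with heq_i
    have himin : ∀ i', i' < istar → ¬ (1 ≤ i' ∧ traj d p i' = traj d p (2 * i')) := by
      intro i' hi'
      exact Nat.find_min hmex hi'
    have hibound : istar ≤ d.size := by
      have hle : istar ≤ P :=
        Nat.find_min' hmex ⟨hPpos, (meetC_back d p hμm hμeq P hb1 hPdvd).symm⟩
      omega
    have hA := AloopC d p hC hμm hμeq hmin PySem.Set.empty p ⟨0, by omega, rfl, hvis0⟩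
    have hB := floyd1C d p hC hμm hμeq hmin hmeet_spec.1 hmeet_spec.2 himin (by omega)
      (d.size + 1) 0 (by omega) (by omega)
    rw [show (2 * 0 : Nat) = 0 from rfl, traj_zero] at hB
    rw [hA, hB, ← hμeq]
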